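-- pv_equiv track=rewrite | github.com/alfallouji/AWS-SAMPLES | flowlog_analyzer/cw.py | parse
-- ===== SOURCE A (Python) =====
-- def parse(data, maxSkipStep = 0):
--     ranges = []
--     leftovers = []
--     rangeStart = None
--     rangeEnd = None
--     previousPort = None
--     unusedPorts = []
--
--     for port in data:
--         if (previousPort != None and (port <= previousPort + 1 + maxSkipStep or port == previousPort + 1)):
--             if (port <= previousPort + 1 + maxSkipStep and port != previousPort + 1):
--                 unusedPorts.extend(range(previousPort + 1, port, 1))
--             if (rangeStart == None):
--                 rangeStart = previousPort
--             rangeEnd = port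
--             previousPort = port
--         else:
--             if (rangeStart != None and rangeEnd != None):
--                 ranges.append({'start': rangeStart, 'end': rangeEnd})
--             else:
--                 if (previousPort != None):
--                     leftovers.append(previousPort)
--             rangeStart = None
--             rangeEnd = None
--             previousPort = port
--
--     if (rangeStart != None and rangeEnd != None):
--         ranges.append({'start': rangeStart, 'end': rangeEnd})
--
--     if (previousPort != None and rangeEnd == None):
--         leftovers.append(previousPort)
--
--     return ranges, leftovers, unusedPorts
-- ===== SOURCE B (Python) =====
-- def parse(data, maxSkipStep = 0):
--     # Staged passes: adjacency flags -> cut positions -> slice into runs -> classify.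
--     pairs = list(zip(data, data[1:]))
--     joins = [b <= a + 1 + maxSkipStep or b == a + 1 for a, b in pairs]
--     cuts = [0] + [i + 1 for i, j in enumerate(joins) if not j] + [len(data)]
--     runs = [data[s:e] for s, e in zip(cuts, cuts[1:])]
--     ranges = [{'start': r[0], 'end': r[-1]} for r in runs if len(r) >= 2]
--     leftovers = [r[0] for r in runs if len(r) == 1]
--     unused = [p for (a, b), j in zip(pairs, joins) if j for p in range(a + 1, b)]
--     return ranges, leftovers, unused
-- ===== Notes on version B (the rewrite author's own statement) =====
-- stated objective: alternative
-- what changed: B replaces A's single-pass five-variable state machine by staged passes over index structure: it first computes the list of adjacency flags for consecutive pairs, turns the false flags' positions into cut indices, slices the data at those cuts into runs, and finally classifies each slice as a range or leftover and gathers gaps from the flagged pairs by comprehensions.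
import Mathlib
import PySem

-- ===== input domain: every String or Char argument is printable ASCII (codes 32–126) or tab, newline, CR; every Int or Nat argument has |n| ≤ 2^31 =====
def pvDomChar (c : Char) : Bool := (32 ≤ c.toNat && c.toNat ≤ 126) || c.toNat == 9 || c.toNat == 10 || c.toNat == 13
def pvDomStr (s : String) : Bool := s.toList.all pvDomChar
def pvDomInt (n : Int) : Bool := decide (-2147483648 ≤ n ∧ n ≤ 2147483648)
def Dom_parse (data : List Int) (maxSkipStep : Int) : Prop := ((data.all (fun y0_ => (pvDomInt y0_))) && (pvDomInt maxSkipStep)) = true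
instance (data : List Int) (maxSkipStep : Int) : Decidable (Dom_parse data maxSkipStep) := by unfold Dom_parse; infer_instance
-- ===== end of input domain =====

-- B restages A's single-pass state machine as staged passes: adjacency flags,
-- cut positions, slicing into runs, then classification (objective: alternative, same cost).

-- ===== PORT A =====
-- the dict {'start': s, 'end': e}
def pvMkRange (s e : Int) : List (String × Int) := [("start", s), ("end", e)]

-- A's loop state: (ranges, leftovers, rangeStart, rangeEnd, previousPort, unusedPorts)
def pvAState : Type := List (List (String × Int)) × List Int × Option Int × Option Int × Option Int × List Int

-- A's else-branch (reached when previousPort is None or the join condition fails)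
def pvBreakA (ranges : List (List (String × Int))) (leftovers : List Int)
    (rangeStart rangeEnd previousPort : Option Int) (unused : List Int) (port : Int) : pvAState :=
  match rangeStart, rangeEnd with
  | some s, some e => (ranges ++ [pvMkRange s e], leftovers, none, none, some port, unused)
  | _, _ =>
    match previousPort with
    | some p => (ranges, leftovers ++ [p], none, none, some port, unused)
    | none => (ranges, leftovers, none, none, some port, unused)

-- A's loop body
def pvStepA (maxSkipStep : Int) (st : pvAState) (port : Int) : pvAState :=
  match st with
  | (ranges, leftovers, rangeStart, rangeEnd, previousPort, unused) =>
    match previousPort with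
    | some prev =>
      if port ≤ prev + 1 + maxSkipStep ∨ port = prev + 1 then
        let unused' := if port ≤ prev + 1 + maxSkipStep ∧ port ≠ prev + 1
          then unused ++ PySem.List.pyRange (prev + 1) port 1 else unused
        let rangeStart' := match rangeStart with | none => some prev | some s => some s
        (ranges, leftovers, rangeStart', some port, some port, unused')
      else pvBreakA ranges leftovers rangeStart rangeEnd previousPort unused port
    | none => pvBreakA ranges leftovers rangeStart rangeEnd previousPort unused port

-- A's code after the loop
def pvFinishA (st : pvAState) : (List (List (String × Int))) × List Int × List Int :=
  match st with
  | (ranges, leftovers, rangeStart, rangeEnd, previousPort, unused) =>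
    let ranges' := match rangeStart, rangeEnd with
      | some s, some e => ranges ++ [pvMkRange s e]
      | _, _ => ranges
    let leftovers' := match previousPort, rangeEnd with
      | some p, none => leftovers ++ [p]
      | _, _ => leftovers
    (ranges', leftovers', unused)

def parse (data : List Int) (maxSkipStep : Int) : (List (List (String × Int))) × List Int × List Int :=
  pvFinishA (data.foldl (pvStepA maxSkipStep) ([], [], none, none, none, []))

-- ===== PORT B =====
-- the per-pair predicate 'b <= a + 1 + maxSkipStep or b == a + 1'
def pvJoined (m a b : Int) : Bool := decide (b ≤ a + 1 + m ∨ b = a + 1)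

def parse_alt (data : List Int) (maxSkipStep : Int) : (List (List (String × Int))) × List Int × List Int :=
  -- pairs = list(zip(data, data[1:]))
  let pairs := data.zip (PySem.List.slice data (some 1) none)
  -- joins = [b <= a + 1 + maxSkipStep or b == a + 1 for a, b in pairs]
  let joins := pairs.map (fun p => pvJoined maxSkipStep p.1 p.2)
  -- cuts = [0] + [i + 1 for i, j in enumerate(joins) if not j] + [len(data)]
  let cuts : List Int := [0]
    ++ ((PySem.List.enumerate joins 0).filterMap (fun ij => if ij.2 then none else some (ij.1 + 1)))
    ++ [(data.length : Int)]
  -- runs = [data[s:e] for s, e in zip(cuts, cuts[1:])]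
  let runs := (cuts.zip (PySem.List.slice cuts (some 1) none)).map
    (fun se => PySem.List.slice data (some se.1) (some se.2))
  -- ranges = [{'start': r[0], 'end': r[-1]} for r in runs if len(r) >= 2]
  let ranges := (runs.filter (fun r => decide (2 ≤ r.length))).map
    (fun r => pvMkRange (PySem.List.pyGetD r 0 0) (PySem.List.pyGetD r (-1) 0))
  -- leftovers = [r[0] for r in runs if len(r) == 1]
  let leftovers := (runs.filter (fun r => decide (r.length = 1))).map
    (fun r => PySem.List.pyGetD r 0 0)
  -- unused = [p for (a, b), j in zip(pairs, joins) if j for p in range(a + 1, b)]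
  let unused := ((pairs.zip joins).filter (fun pj => pj.2)).flatMap
    (fun pj => PySem.List.pyRange (pj.1.1 + 1) pj.1.2 1)
  (ranges, leftovers, unused)

-- ===== PRECONDITION & SPEC =====
def Spec_parse (data : List Int) (maxSkipStep : Int) (out : (List (List (String × Int))) × List Int × List Int) : Prop := out = parse_alt data maxSkipStep
instance (data : List Int) (maxSkipStep : Int) (out : (List (List (String × Int))) × List Int × List Int) : Decidable (Spec_parse data maxSkipStep out) := by unfold Spec_parse; infer_instance

-- ===== CLAIM (what is proved, stated in full; the proofs are below) =====
def Claim_equal_parse : Prop := ∀ (data : List Int) (maxSkipStep : Int), Dom_parse data maxSkipStep → Spec_parse data maxSkipStep (parse data maxSkipStep)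

-- ===== LEMMAS AND PROOFS =====

-- intermediate machine (the run-accumulating fold): state (runs, cur, unused)
def pvBState : Type := List (List Int) × List Int × List Int

def pvStepB (maxSkipStep : Int) (st : pvBState) (port : Int) : pvBState :=
  match st with
  | (runs, cur, unused) =>
    match cur.getLast? with
    | some last =>
      if port ≤ last + 1 + maxSkipStep ∨ port = last + 1 then
        (runs, cur ++ [port], unused ++ PySem.List.pyRange (last + 1) port 1)
      else (runs ++ [cur], [port], unused)
    | none => (runs, [port], unused)

def pvRangesOf (runs : List (List Int)) : List (List (String × Int)) :=
  (runs.filter (fun r => decide (2 ≤ r.length))).map (fun r => pvMkRange (r.headD 0) (r.getLastD 0))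

def pvLeftOf (runs : List (List Int)) : List Int :=
  (runs.filter (fun r => decide (r.length = 1))).map (fun r => r.headD 0)

def pvFinishB (st : pvBState) : (List (List (String × Int))) × List Int × List Int :=
  match st with
  | (runs, cur, unused) =>
    let runs' := if cur = [] then runs else runs ++ [cur]
    (pvRangesOf runs', pvLeftOf runs', unused)

-- abstraction: the A-state that corresponds to a B-state
def pvAof (runs : List (List Int)) (cur : List Int) (unused : List Int) : pvAState :=
  (pvRangesOf runs, pvLeftOf runs,
   if 2 ≤ cur.length then some (cur.headD 0) else none,
   if 2 ≤ cur.length then some (cur.getLastD 0) else none,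
   cur.getLast?, unused)

def pvAofB (st : pvBState) : pvAState := pvAof st.1 st.2.1 st.2.2

lemma pvStep_comm (m : Int) (runs : List (List Int)) (cur unused : List Int) (port : Int) :
    pvStepA m (pvAof runs cur unused) port = pvAofB (pvStepB m (runs, cur, unused) port) := by
  match cur with
  | [] => simp [pvAof, pvAofB, pvStepA, pvStepB, pvBreakA]
  | [p] =>
    simp only [pvAof, pvAofB, pvStepA, pvStepB, List.getLast?_singleton, List.length_singleton]
    by_cases h : port ≤ p + 1 + m ∨ port = p + 1
    · simp only [if_pos h]
      by_cases h2 : port ≤ p + 1 + m ∧ port ≠ p + 1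
      · simp [h2]
      · have hp : port = p + 1 := by omega
        simp [hp]
    · simp [if_neg h, pvBreakA, pvRangesOf, pvLeftOf, List.filter_append]
  | p :: q :: rest =>
    obtain ⟨l, hl⟩ : ∃ l, (p :: q :: rest).getLast? = some l := by
      cases h : (p :: q :: rest).getLast? with
      | none => simp at h
      | some l => exact ⟨l, rfl⟩
    have hql : (q :: rest).getLast? = some l := by rwa [List.getLast?_cons_cons] at hl
    have hld : (p :: q :: rest).getLastD 0 = l := by
      rw [List.getLastD_eq_getLast?, hl]; rfl
    have hlen : 2 ≤ (p :: q :: rest).length := by simp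
    have hcc : (q :: (rest ++ [port])) = (q :: rest) ++ [port] := rfl
    simp only [pvAof, pvAofB, pvStepA, pvStepB, hl, hld, if_pos hlen]
    by_cases h : port ≤ l + 1 + m ∨ port = l + 1
    · simp only [if_pos h]
      have hgl : (q :: (rest ++ [port])).getLast? = some port := by
        rw [hcc, List.getLast?_concat]
      by_cases h2 : port ≤ l + 1 + m ∧ port ≠ l + 1
      · simp [h2, hgl]
      · have hp : port = l + 1 := by omega
        subst hp
        simp [hgl]
    · simp only [if_neg h, pvBreakA]
      simp [pvRangesOf, pvLeftOf, List.filter_append, hql]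

lemma pvFold_comm (m : Int) (data : List Int) :
    ∀ (runs : List (List Int)) (cur unused : List Int),
    data.foldl (pvStepA m) (pvAof runs cur unused) = pvAofB (data.foldl (pvStepB m) (runs, cur, unused)) := by
  induction data with
  | nil => intro runs cur unused; rfl
  | cons port rest ih =>
    intro runs cur unused
    simp only [List.foldl_cons]
    rw [pvStep_comm]
    rcases h : pvStepB m (runs, cur, unused) port with ⟨runs', cur', unused'⟩
    exact ih runs' cur' unused'

lemma pvFinish_comm (runs : List (List Int)) (cur unused : List Int) :
    pvFinishA (pvAof runs cur unused) = pvFinishB (runs, cur, unused) := by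
  match cur with
  | [] => simp [pvAof, pvFinishA, pvFinishB]
  | [p] =>
    simp [pvAof, pvFinishA, pvFinishB, pvRangesOf, pvLeftOf, List.filter_append, List.map_append]
  | p :: q :: rest =>
    have hlen : 2 ≤ (p :: q :: rest).length := by simp
    obtain ⟨l, hl⟩ : ∃ l, (p :: q :: rest).getLast? = some l := by
      cases h : (p :: q :: rest).getLast? with
      | none => simp at h
      | some l => exact ⟨l, rfl⟩
    have hql : (q :: rest).getLast? = some l := by rwa [List.getLast?_cons_cons] at hl
    have hld : (p :: q :: rest).getLastD 0 = l := by
      rw [List.getLastD_eq_getLast?, hl]; rfl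
    simp only [pvAof, pvFinishA, pvFinishB, if_pos hlen, hl, hld]
    simp [pvRangesOf, pvLeftOf, List.filter_append, List.map_append, hql]

theorem pvA_eq_foldB (data : List Int) (m : Int) :
    parse data m = pvFinishB (data.foldl (pvStepB m) ([], [], [])) := by
  unfold parse
  have h0 : (([], [], none, none, none, []) : pvAState) = pvAof [] [] [] := by rfl
  rw [h0, pvFold_comm]
  rcases h : data.foldl (pvStepB m) ([], [], []) with ⟨runs, cur, unused⟩
  exact pvFinish_comm runs cur unused

-- the run partition, cons-recursively: pvExt m prev xs = (extension of the run
-- containing prev, the remaining runs)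
def pvExt (m : Int) (prev : Int) : List Int → List Int × List (List Int)
  | [] => ([], [])
  | x :: xs =>
    let er := pvExt m x xs
    if pvJoined m prev x then (x :: er.1, er.2) else ([], (x :: er.1) :: er.2)

-- the skipped ports inside one run
def pvGaps (r : List Int) : List Int :=
  (r.zip r.tail).flatMap (fun p => PySem.List.pyRange (p.1 + 1) p.2 1)

lemma pvGaps_single (a : Int) : pvGaps [a] = [] := by simp [pvGaps]

lemma pvGaps_cons (a b : Int) (t : List Int) :
    pvGaps (a :: b :: t) = PySem.List.pyRange (a + 1) b 1 ++ pvGaps (b :: t) := by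
  simp [pvGaps]

-- the fold, started inside a run, produces the partition computed by pvExt
lemma pvFoldB_ext (m : Int) (rest : List Int) :
    ∀ (runs : List (List Int)) (pre : List Int) (last : Int) (unused : List Int),
    pvFinishB (rest.foldl (pvStepB m) (runs, pre ++ [last], unused)) =
      (pvRangesOf (runs ++ [pre ++ last :: (pvExt m last rest).1] ++ (pvExt m last rest).2),
       pvLeftOf (runs ++ [pre ++ last :: (pvExt m last rest).1] ++ (pvExt m last rest).2),
       unused ++ pvGaps (last :: (pvExt m last rest).1) ++ (pvExt m last rest).2.flatMap pvGaps) := by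
  induction rest with
  | nil =>
    intro runs pre last unused
    simp [pvFinishB, pvExt, pvGaps_single]
  | cons x xs ih =>
    intro runs pre last unused
    simp only [List.foldl_cons, pvStepB, List.getLast?_concat]
    by_cases h : x ≤ last + 1 + m ∨ x = last + 1
    · have hj : pvJoined m last x = true := by simp [pvJoined, h]
      simp only [if_pos h]
      rw [ih runs (pre ++ [last]) x (unused ++ PySem.List.pyRange (last + 1) x 1)]
      simp [pvExt, hj, pvGaps_cons, List.append_assoc]
    · have hj : pvJoined m last x = false := by simp [pvJoined]; omega
      simp only [if_neg h]
      have := ih (runs ++ [pre ++ [last]]) [] x unused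
      simp only [List.nil_append] at this
      rw [this]
      simp [pvExt, hj, pvGaps_single, List.append_assoc]

-- flatten structure of the partition
lemma pvExt_flatten (m : Int) (xs : List Int) :
    ∀ prev, prev :: xs = prev :: (pvExt m prev xs).1 ++ (pvExt m prev xs).2.flatten := by
  induction xs with
  | nil => intro prev; simp [pvExt]
  | cons x xs ih =>
    intro prev
    by_cases hj : pvJoined m prev x
    · simpa [pvExt, hj] using ih x
    · simpa [pvExt, hj] using ih x

-- cut positions from the flags (with arbitrary enumerate start)
def pvCutsOf (c : Int) : List (List Int) → List Int
  | [] => []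
  | r :: rt => c :: pvCutsOf (c + r.length) rt

lemma pvCutsMid (m : Int) (xs : List Int) :
    ∀ (prev : Int) (s : Int),
    (PySem.List.enumerate (((prev :: xs).zip xs).map (fun p => pvJoined m p.1 p.2)) s).filterMap
        (fun ij => if ij.2 then none else some (ij.1 + 1)) =
      pvCutsOf (s + (pvExt m prev xs).1.length + 1) (pvExt m prev xs).2 := by
  induction xs with
  | nil => intro prev s; simp [pvExt, PySem.List.enumerate_nil, pvCutsOf]
  | cons x xs ih =>
    intro prev s
    have hz : (prev :: x :: xs).zip (x :: xs) = (prev, x) :: ((x :: xs).zip xs) := rfl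
    rw [hz]
    simp only [List.map_cons, PySem.List.enumerate_cons, List.filterMap_cons]
    by_cases hj : pvJoined m prev x
    · simp only [hj, if_pos]
      rw [ih x (s + 1)]
      simp only [pvExt, hj, if_pos]
      congr 1
      push_cast [List.length_cons]
      ring
    · simp only [hj, Bool.false_eq_true, if_false]
      rw [ih x (s + 1)]
      simp only [pvExt, hj, Bool.false_eq_true, if_false, pvCutsOf]
      congr 1
      · push_cast [List.length_nil]
        ring
      · congr 1
        push_cast [List.length_cons, List.length_nil]
        ring

-- the full cut sequence, as partial sums of run lengths
def pvCutSeq (c : Int) : List (List Int) → List Int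
  | [] => [c]
  | r :: rt => c :: pvCutSeq (c + r.length) rt

lemma pvCutsOf_append_total (rs : List (List Int)) :
    ∀ c : Int, pvCutsOf c rs ++ [c + (rs.flatten.length : Int)] = pvCutSeq c rs := by
  induction rs with
  | nil => intro c; simp [pvCutsOf, pvCutSeq]
  | cons r rt ih =>
    intro c
    simp only [pvCutsOf, pvCutSeq, List.cons_append]
    congr 1
    rw [← ih (c + r.length)]
    congr 2
    push_cast [List.flatten_cons, List.length_append]
    ring

lemma pvCutSeq_ne_nil (c : Int) (P : List (List Int)) : pvCutSeq c P ≠ [] := by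
  cases P <;> simp [pvCutSeq]

-- slicing the flattened data at the cut sequence recovers the partition
lemma pvSlices (P : List (List Int)) :
    ∀ (pre : List Int),
    ((pvCutSeq (pre.length : Int) P).zip (pvCutSeq (pre.length : Int) P).tail).map
        (fun se => PySem.List.slice (pre ++ P.flatten) (some se.1) (some se.2)) = P := by
  induction P with
  | nil => intro pre; simp [pvCutSeq]
  | cons r rt ih =>
    intro pre
    have h1 : pvCutSeq (pre.length : Int) (r :: rt) =
        (pre.length : Int) :: pvCutSeq ((pre.length : Int) + r.length) rt := rfl
    rw [h1]
    obtain ⟨c2, tl, h2⟩ : ∃ c2 tl, pvCutSeq ((pre.length : Int) + r.length) rt = c2 :: tl := by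
      cases hh : pvCutSeq ((pre.length : Int) + r.length) rt with
      | nil => exact absurd hh (pvCutSeq_ne_nil _ _)
      | cons a b => exact ⟨a, b, rfl⟩
    have hc2 : c2 = (pre.length : Int) + r.length := by
      cases rt <;> simp [pvCutSeq] at h2 <;> omega
    rw [h2]
    simp only [List.tail_cons, List.zip_cons_cons, List.map_cons]
    congr 1
    · rw [hc2]
      have hcc : ((pre.length : Int) + r.length) = ((pre.length : Nat) : Int) + ((r.length : Nat) : Int) := rfl
      rw [hcc, PySem.List.slice_natCast_add, List.flatten_cons, List.drop_left, List.take_left]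
    · have := ih (pre ++ r)
      rw [List.length_append] at this
      have hcast : ((pre.length + r.length : Nat) : Int) = (pre.length : Int) + (r.length : Int) := by push_cast; ring
      rw [hcast, h2] at this
      simp only [List.tail_cons] at this
      simpa [List.flatten_cons, List.append_assoc] using this

-- the flagged pairs' gaps are the runs' internal gaps
lemma pvUnused (m : Int) (xs : List Int) :
    ∀ prev,
    (((prev :: xs).zip xs).filter (fun p => pvJoined m p.1 p.2)).flatMap
        (fun p => PySem.List.pyRange (p.1 + 1) p.2 1) =
      pvGaps (prev :: (pvExt m prev xs).1) ++ (pvExt m prev xs).2.flatMap pvGaps := by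
  induction xs with
  | nil => intro prev; simp [pvExt, pvGaps_single]
  | cons x xs ih =>
    intro prev
    have hz : (prev :: x :: xs).zip (x :: xs) = (prev, x) :: ((x :: xs).zip xs) := rfl
    rw [hz]
    by_cases hj : pvJoined m prev x
    · simp only [List.filter_cons, hj, if_pos, List.flatMap_cons]
      rw [ih x]
      simp [pvExt, hj, pvGaps_cons]
    · simp only [List.filter_cons, hj, Bool.false_eq_true, if_false]
      rw [ih x]
      simp [pvExt, hj, pvGaps_single]

-- nonempty runs under a length-2 filter: r[-1] is getLastD
lemma pvRangesOf_eq (runs : List (List Int)) :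
    (runs.filter (fun r => decide (2 ≤ r.length))).map
        (fun r => pvMkRange (PySem.List.pyGetD r 0 0) (PySem.List.pyGetD r (-1) 0)) = pvRangesOf runs := by
  unfold pvRangesOf
  apply List.map_congr_left
  intro r hr
  have h2 : 2 ≤ r.length := by
    have := List.of_mem_filter hr
    simpa using this
  have hne : r ≠ [] := by intro h; subst h; simp at h2
  rw [PySem.List.pyGetD_zero, PySem.List.pyGetD_neg_one r 0 hne]
  congr 1
  · cases r with | nil => cases hne rfl | cons a t => rfl
  · rw [List.getLastD_eq_getLast?, List.getLast?_eq_some_getLast hne]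
    rfl

lemma pvLeftOf_eq (runs : List (List Int)) :
    (runs.filter (fun r => decide (r.length = 1))).map
        (fun r => PySem.List.pyGetD r 0 0) = pvLeftOf runs := by
  unfold pvLeftOf
  apply List.map_congr_left
  intro r hr
  rw [PySem.List.pyGetD_zero]
  cases r <;> rfl

-- B's staged computation equals the assembled partition
lemma pvB_eq_foldB (data : List Int) (m : Int) :
    parse_alt data m = pvFinishB (data.foldl (pvStepB m) ([], [], [])) := by
  cases data with
  | nil => rfl
  | cons x xs =>
    -- right side: the fold through the partition
    have hfold : pvFinishB ((x :: xs).foldl (pvStepB m) ([], [], [])) =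
        (pvRangesOf ((x :: (pvExt m x xs).1) :: (pvExt m x xs).2),
         pvLeftOf ((x :: (pvExt m x xs).1) :: (pvExt m x xs).2),
         pvGaps (x :: (pvExt m x xs).1) ++ (pvExt m x xs).2.flatMap pvGaps) := by
      have h0 : pvStepB m ([], [], []) x = ([], [x], []) := rfl
      rw [List.foldl_cons, h0]
      have := pvFoldB_ext m xs [] [] x []
      simp only [List.nil_append] at this
      rw [this]
      simp
    rw [hfold]
    -- left side
    unfold parse_alt
    rw [PySem.List.slice_from_one]
    simp only [List.tail_cons]
    set e := (pvExt m x xs).1 with he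
    set rs := (pvExt m x xs).2 with hrs
    -- cuts
    have hcuts : ([0] ++ ((PySem.List.enumerate (((x :: xs).zip xs).map (fun p => pvJoined m p.1 p.2)) 0).filterMap
          (fun ij => if ij.2 then none else some (ij.1 + 1))) ++ [((x :: xs).length : Int)] : List Int) =
        pvCutSeq 0 ((x :: e) :: rs) := by
      rw [pvCutsMid m xs x 0]
      have hflat : (x :: xs) = (x :: e) ++ rs.flatten := by
        simpa using pvExt_flatten m xs x
      have hlen : ((x :: xs).length : Int) = ((x :: e).length : Int) + (rs.flatten.length : Int) := by
        rw [hflat]; push_cast [List.length_append]; ring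
      show [(0 : Int)] ++ pvCutsOf (0 + (e.length : Int) + 1) rs ++ [((x :: xs).length : Int)] = _
      have hstart : (0 : Int) + (e.length : Int) + 1 = ((x :: e).length : Int) := by
        push_cast [List.length_cons]; ring
      rw [hstart, hlen]
      have := pvCutsOf_append_total rs ((x :: e).length : Int)
      rw [List.append_assoc, this]
      simp [pvCutSeq]
    rw [hcuts]
    -- runs
    rw [PySem.List.slice_from_one]
    have hflat : (x :: xs) = (x :: e) ++ rs.flatten := by
      simpa using pvExt_flatten m xs x
    have hslices : ((pvCutSeq 0 ((x :: e) :: rs)).zip (pvCutSeq 0 ((x :: e) :: rs)).tail).map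
        (fun se => PySem.List.slice (x :: xs) (some se.1) (some se.2)) = (x :: e) :: rs := by
      have := pvSlices ((x :: e) :: rs) []
      simp only [List.length_nil, Nat.cast_zero, List.nil_append] at this
      rw [hflat]
      simpa using this
    rw [hslices]
    -- classify and unused
    rw [pvRangesOf_eq, pvLeftOf_eq]
    -- unused: zip pairs with their mapped flags, then reduce to pvUnused
    congr 2
    have hzm : (((x :: xs).zip xs).zip (((x :: xs).zip xs).map (fun p => pvJoined m p.1 p.2))) =
        ((x :: xs).zip xs).map (fun p => (p, pvJoined m p.1 p.2)) := by
      generalize ((x :: xs).zip xs) = l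
      induction l with
      | nil => rfl
      | cons a t iht => simp [iht]
    rw [hzm, List.filter_map, List.flatMap_map]
    simpa using pvUnused m xs x

-- ===== VERDICT (by name: the statement is the Claim_ definition above) =====
theorem parse_spec : Claim_equal_parse := by
  intro data maxSkipStep _
  show parse data maxSkipStep = parse_alt data maxSkipStep
  rw [pvA_eq_foldB, pvB_eq_foldB]
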